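-- pv_equiv track=rewrite | github.com/raeez/chiral-bar-cobar | compute/lib/bar_cohomology_koszul_criterion.py | compute_self_product
-- ===== SOURCE A (Python) =====
-- from typing import Dict, List, Optional, Tuple
--
-- def compute_self_product(h_coeffs: List[int], include_h0: bool = True) -> List[int]:
--     """Compute coefficients of P(t)*P(-t) where P(t) = sum h_n t^n.
--
--     If include_h0 is True, h_coeffs starts with h_0 (usually 1).
--     Returns the coefficients of the product as a list.
--
--     NOTE: For a genuine Koszul duality relation, the product is
--     H_A(t)*H_{A!}(-t) = 1, where H_A is the ALGEBRA's series and
--     H_{A!} is the DUAL's series. These are DIFFERENT series.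
--     The self-product P(t)*P(-t) has no a priori reason to equal 1.
--     """
--     N = len(h_coeffs)
--     product = [0] * (2 * N - 1)
--     for i in range(N):
--         for j in range(N):
--             if i + j < len(product):
--                 # P(t) has coefficient h_i at t^i
--                 # P(-t) has coefficient (-1)^j * h_j at t^j
--                 product[i + j] += h_coeffs[i] * ((-1) ** j) * h_coeffs[j]
--     return product
-- ===== SOURCE B (Python) =====
-- def compute_self_product(h_coeffs, include_h0=True):
--     """P(t)*P(-t) is an even series: odd coefficients cancel in pairs.
--     So compute only the even coefficients, each by a direct gather sum."""
--     N = len(h_coeffs)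
--     if N == 0:
--         return []
--     out = [0] * (2 * N - 1)
--     for m in range(N):
--         k = 2 * m
--         lo = k - N + 1 if k >= N else 0
--         hi = k if k < N else N - 1
--         acc = 0
--         for j in range(lo, hi + 1):
--             c = h_coeffs[k - j] * h_coeffs[j]
--             acc += -c if j % 2 else c
--         out[k] = acc
--     return out
-- ===== Notes on version B (the rewrite author's own statement) =====
-- stated objective: faster
-- what changed: B exploits that P(t)*P(-t) is an even series (odd coefficients cancel in pairs), so it computes only the even coefficients, each by a direct gather convolution sum over the valid j-range, instead of A's full scatter over all N^2 (i,j) pairs with per-term (-1)**j powers.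
import Mathlib
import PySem

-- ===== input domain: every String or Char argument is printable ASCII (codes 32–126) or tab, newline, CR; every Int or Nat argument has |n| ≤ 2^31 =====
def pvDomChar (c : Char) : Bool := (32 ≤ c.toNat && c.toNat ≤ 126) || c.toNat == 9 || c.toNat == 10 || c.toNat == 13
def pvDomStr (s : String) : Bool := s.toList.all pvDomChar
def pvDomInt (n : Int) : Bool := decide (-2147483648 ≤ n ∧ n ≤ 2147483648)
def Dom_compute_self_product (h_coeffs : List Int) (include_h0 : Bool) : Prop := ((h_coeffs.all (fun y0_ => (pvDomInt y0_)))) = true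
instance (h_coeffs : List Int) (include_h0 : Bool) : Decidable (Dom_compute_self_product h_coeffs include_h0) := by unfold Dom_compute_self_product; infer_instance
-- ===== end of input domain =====

-- B computes only the even coefficients of P(t)*P(-t) (odd ones cancel in pairs) by direct
-- gather sums over the valid index range, instead of A's full N^2 scatter; measurably faster.



-- ===== PORT A =====
def compute_self_product (h_coeffs : List Int) (include_h0 : Bool) : List Int :=
  let N := h_coeffs.length
  let product := List.replicate (2 * N - 1) 0
  (List.range N).foldl (fun product i =>
    (List.range N).foldl (fun product j =>
      if i + j < product.length then
        product.set (i + j)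
          (product.getD (i + j) 0 + h_coeffs.getD i 0 * (-1 : Int) ^ j * h_coeffs.getD j 0)
      else product) product) product

-- ===== PORT B =====
def compute_self_product_alt (h_coeffs : List Int) (include_h0 : Bool) : List Int :=
  let N := h_coeffs.length
  if N = 0 then []
  else
    (List.range N).foldl (fun out m =>
      let k := 2 * m
      let lo := if N ≤ k then k - N + 1 else 0
      let hi := if k < N then k else N - 1
      let acc := (List.range' lo (hi + 1 - lo)).foldl (fun acc j =>
        let c := h_coeffs.getD (k - j) 0 * h_coeffs.getD j 0
        if j % 2 = 1 then acc + (-c) else acc + c) 0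
      out.set k acc) (List.replicate (2 * N - 1) 0)


-- ===== PRECONDITION & SPEC =====
def Spec_compute_self_product (h_coeffs : List Int) (include_h0 : Bool) (out : List Int) : Prop := out = compute_self_product_alt h_coeffs include_h0
instance (h_coeffs : List Int) (include_h0 : Bool) (out : List Int) : Decidable (Spec_compute_self_product h_coeffs include_h0 out) := by unfold Spec_compute_self_product; infer_instance

-- ===== CLAIM (what is proved, stated in full; the proofs are below) =====
def Claim_equal_compute_self_product : Prop := ∀ (h_coeffs : List Int) (include_h0 : Bool), Dom_compute_self_product h_coeffs include_h0 → Spec_compute_self_product h_coeffs include_h0 (compute_self_product h_coeffs include_h0)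

-- ===== LEMMAS AND PROOFS =====
theorem getD_set_eq_ite (l : List Int) (a b : Nat) (x : Int) (h : a < l.length) :
    (l.set a x).getD b 0 = if a = b then x else l.getD b 0 := by
  simp [List.getD_eq_getElem?_getD, List.getElem?_set]
  split
  · next hab => subst hab; simp
  · rfl

theorem sum_map_range' (lo n : Nat) (f : Nat → Int) :
    ((List.range' lo n).map f).sum = ∑ j ∈ Finset.Ico lo (lo + n), f j := by
  rw [Finset.sum_Ico_eq_sum_range, List.range'_eq_map_range, List.map_map]
  simp only [Nat.add_sub_cancel_left, Function.comp_def]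
  rfl

-- generic scatter-add characterization (A's loops)
theorem foldl_scatter_add (p : List Int) (idx : Nat → Nat) (v : Nat → Int) (n : Nat)
    (hidx : ∀ t, t < n → idx t < p.length) :
    let F := (List.range n).foldl
      (fun q t => if idx t < q.length then q.set (idx t) (q.getD (idx t) 0 + v t) else q) p
    F.length = p.length ∧
      ∀ k, F.getD k 0 = p.getD k 0 + ∑ t ∈ Finset.range n, if idx t = k then v t else 0 := by
  intro F
  induction n with
  | zero => simp [F]
  | succ n ih =>
    have hidx' : ∀ t, t < n → idx t < p.length := fun t ht => hidx t (Nat.lt_succ_of_lt ht)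
    obtain ⟨hlen, hget⟩ := ih hidx'
    set q := (List.range n).foldl
      (fun q t => if idx t < q.length then q.set (idx t) (q.getD (idx t) 0 + v t) else q) p with hq
    have hstep : F = if idx n < q.length then q.set (idx n) (q.getD (idx n) 0 + v n) else q := by
      simp only [F, List.range_succ, List.foldl_append, List.foldl_cons, List.foldl_nil]
      rw [← hq]
    have hin : idx n < q.length := by rw [hlen]; exact hidx n (Nat.lt_succ_self n)
    rw [hstep, if_pos hin]
    constructor
    · simp [hlen]
    · intro k
      rw [getD_set_eq_ite _ _ _ _ hin, Finset.sum_range_succ, hget (idx n), hget k]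
      split
      · next he => subst he; simp; ring
      · next he => simp

-- B's distinct-sets characterization
theorem foldl_set_even (w : Nat → Int) (p : List Int) (n : Nat)
    (hp : ∀ m, m < n → 2 * m < p.length) :
    let F := (List.range n).foldl (fun out m => out.set (2 * m) (w m)) p
    F.length = p.length ∧
      ∀ k, F.getD k 0 = if k % 2 = 0 ∧ k / 2 < n then w (k / 2) else p.getD k 0 := by
  intro F
  induction n with
  | zero => simp [F]
  | succ n ih =>
    obtain ⟨hlen, hget⟩ := ih (fun m hm => hp m (Nat.lt_succ_of_lt hm))
    have hstep : F = ((List.range n).foldl (fun out m => out.set (2 * m) (w m)) p).set (2 * n) (w n) := by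
      simp only [F, List.range_succ, List.foldl_append, List.foldl_cons, List.foldl_nil]
    set q := (List.range n).foldl (fun out m => out.set (2 * m) (w m)) p with hq
    have hin : 2 * n < q.length := by rw [hlen]; exact hp n (Nat.lt_succ_self n)
    rw [hstep]
    refine ⟨by simp [hlen], fun k => ?_⟩
    rw [getD_set_eq_ite _ _ _ _ hin, hget k]
    split
    · next he =>
      subst he
      rw [if_pos (by omega : (2 * n) % 2 = 0 ∧ (2 * n) / 2 < n + 1)]
      congr 1
      omega
    · next he =>
      have hiff : (k % 2 = 0 ∧ k / 2 < n + 1) ↔ (k % 2 = 0 ∧ k / 2 < n) := by omega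
      rw [if_congr hiff rfl rfl]

-- B inner fold = signed sum
theorem foldl_signed (h : List Int) (k : Nat) (l : List Nat) (a : Int) :
    l.foldl (fun acc j =>
      if j % 2 = 1 then acc + (-(h.getD (k - j) 0 * h.getD j 0))
      else acc + h.getD (k - j) 0 * h.getD j 0) a
    = a + (l.map (fun j => (-1 : Int) ^ j * (h.getD (k - j) 0 * h.getD j 0))).sum := by
  induction l generalizing a with
  | nil => simp
  | cons x xs ih =>
    simp only [List.foldl_cons, List.map_cons, List.sum_cons, ih]
    rcases Nat.even_or_odd x with he | ho
    · rw [if_neg (by rw [Nat.even_iff] at he; omega), he.neg_one_pow]; ring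
    · rw [if_pos (Nat.odd_iff.mp ho), ho.neg_one_pow]; ring

theorem odd_sum_zero (h : List Int) (k : Nat) (hk : k % 2 = 1) :
    (∑ i ∈ Finset.range h.length, ∑ j ∈ Finset.range h.length,
      if i + j = k then h.getD i 0 * (-1 : Int) ^ j * h.getD j 0 else 0) = 0 := by
  set S := ∑ i ∈ Finset.range h.length, ∑ j ∈ Finset.range h.length,
      if i + j = k then h.getD i 0 * (-1 : Int) ^ j * h.getD j 0 else 0 with hS
  have hswap : S = ∑ i ∈ Finset.range h.length, ∑ j ∈ Finset.range h.length,
      if j + i = k then h.getD j 0 * (-1 : Int) ^ i * h.getD i 0 else 0 := by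
    rw [hS, Finset.sum_comm]
  have hzero : S + S = 0 := by
    nth_rewrite 2 [hswap]
    rw [hS, ← Finset.sum_add_distrib]
    apply Finset.sum_eq_zero
    intro i _
    rw [← Finset.sum_add_distrib]
    apply Finset.sum_eq_zero
    intro j _
    by_cases hij : i + j = k
    · rw [if_pos hij, if_pos (by omega)]
      rcases Nat.even_or_odd i with he | ho
      · have hj : Odd j := by
          rw [Nat.even_iff] at he; rw [Nat.odd_iff]; omega
        rw [he.neg_one_pow, hj.neg_one_pow]; ring
      · have hj : Even j := by
          rw [Nat.odd_iff] at ho; rw [Nat.even_iff]; omega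
        rw [ho.neg_one_pow, hj.neg_one_pow]; ring
    · rw [if_neg hij, if_neg (by omega)]; ring
  omega

theorem even_sum (h : List Int) (m lo hi : Nat) (hm : m < h.length)
    (hlo : lo = if h.length ≤ 2 * m then 2 * m - h.length + 1 else 0)
    (hhi : hi = if 2 * m < h.length then 2 * m else h.length - 1) :
    (∑ i ∈ Finset.range h.length, ∑ j ∈ Finset.range h.length,
      if i + j = 2 * m then h.getD i 0 * (-1 : Int) ^ j * h.getD j 0 else 0)
    = ∑ j ∈ Finset.Ico lo (hi + 1), (-1 : Int) ^ j * (h.getD (2 * m - j) 0 * h.getD j 0) := by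
  have hlo' : lo = 2 * m + 1 - h.length := by rw [hlo]; split <;> omega
  have hhi' : hi = min (2 * m) (h.length - 1) := by rw [hhi]; split <;> omega
  clear hlo hhi
  rw [Finset.sum_comm]
  have hinner : ∀ j ∈ Finset.range h.length,
      (∑ i ∈ Finset.range h.length,
        if i + j = 2 * m then h.getD i 0 * (-1 : Int) ^ j * h.getD j 0 else 0)
      = if lo ≤ j ∧ j < hi + 1 then (-1 : Int) ^ j * (h.getD (2 * m - j) 0 * h.getD j 0) else 0 := by
    intro j hj
    rw [Finset.mem_range] at hj
    by_cases hc : j ≤ 2 * m ∧ 2 * m - j < h.length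
    · rw [if_pos (by omega)]
      rw [Finset.sum_eq_single (2 * m - j)]
      · rw [if_pos (by omega)]; ring
      · intro i _ hne
        rw [if_neg (by omega)]
      · intro habs
        exact absurd (Finset.mem_range.mpr (by omega)) habs
    · rw [if_neg (by omega)]
      apply Finset.sum_eq_zero
      intro i hi'
      rw [Finset.mem_range] at hi'
      rw [if_neg (by omega)]
  rw [Finset.sum_congr rfl hinner, ← Finset.sum_filter]
  congr 1
  ext j
  simp only [Finset.mem_filter, Finset.mem_range, Finset.mem_Ico]
  omega
-- ===== PORT A =====

theorem getD_replicate_zero (n k : Nat) : (List.replicate n (0 : Int)).getD k 0 = 0 := by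
  rw [List.getD_eq_getElem?_getD, List.getElem?_replicate]
  split <;> rfl

theorem A_char (h : List Int) (b : Bool) :
    (compute_self_product h b).length = 2 * h.length - 1 ∧
    ∀ k, (compute_self_product h b).getD k 0 =
      ∑ i ∈ Finset.range h.length, ∑ j ∈ Finset.range h.length,
        if i + j = k then h.getD i 0 * (-1 : Int) ^ j * h.getD j 0 else 0 := by
  show (let F := (List.range h.length).foldl _ (List.replicate (2 * h.length - 1) 0); F.length = _ ∧ _)
  have main : ∀ n, n ≤ h.length →
      let F := (List.range n).foldl (fun product i =>
        (List.range h.length).foldl (fun product j =>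
          if i + j < product.length then
            product.set (i + j)
              (product.getD (i + j) 0 + h.getD i 0 * (-1 : Int) ^ j * h.getD j 0)
          else product) product) (List.replicate (2 * h.length - 1) 0)
      F.length = 2 * h.length - 1 ∧
      ∀ k, F.getD k 0 = ∑ i ∈ Finset.range n, ∑ j ∈ Finset.range h.length,
        if i + j = k then h.getD i 0 * (-1 : Int) ^ j * h.getD j 0 else 0 := by
    intro n hn
    induction n with
    | zero => simp
    | succ n ih =>
      obtain ⟨hlen, hget⟩ := ih (by omega)
      intro F
      set q := (List.range n).foldl (fun product i =>
        (List.range h.length).foldl (fun product j =>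
          if i + j < product.length then
            product.set (i + j)
              (product.getD (i + j) 0 + h.getD i 0 * (-1 : Int) ^ j * h.getD j 0)
          else product) product) (List.replicate (2 * h.length - 1) 0) with hq
      have hstep : F = (List.range h.length).foldl (fun product j =>
          if n + j < product.length then
            product.set (n + j)
              (product.getD (n + j) 0 + h.getD n 0 * (-1 : Int) ^ j * h.getD j 0)
          else product) q := by
        simp only [F, List.range_succ, List.foldl_append, List.foldl_cons, List.foldl_nil]
        rw [← hq]
      obtain ⟨slen, sget⟩ := foldl_scatter_add q (fun j => n + j)
        (fun j => h.getD n 0 * (-1 : Int) ^ j * h.getD j 0) h.length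
        (by intro t ht; rw [hlen]; show n + t < _; omega)
      rw [hstep]
      refine ⟨by rw [slen, hlen], fun k => ?_⟩
      rw [sget k, hget k, Finset.sum_range_succ]
  exact main h.length le_rfl

theorem B_char (h : List Int) (b : Bool) (h0 : ¬ h.length = 0) :
    (compute_self_product_alt h b).length = 2 * h.length - 1 ∧
    ∀ k, (compute_self_product_alt h b).getD k 0 =
      if k % 2 = 0 ∧ k / 2 < h.length then
        ∑ j ∈ Finset.Ico (if h.length ≤ 2 * (k / 2) then 2 * (k / 2) - h.length + 1 else 0)
            ((if 2 * (k / 2) < h.length then 2 * (k / 2) else h.length - 1) + 1),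
          (-1 : Int) ^ j * (h.getD (2 * (k / 2) - j) 0 * h.getD j 0)
      else 0 := by
  have halt : compute_self_product_alt h b =
      (List.range h.length).foldl (fun out m =>
        out.set (2 * m)
          ((List.range' (if h.length ≤ 2 * m then 2 * m - h.length + 1 else 0)
              ((if 2 * m < h.length then 2 * m else h.length - 1) + 1 -
                (if h.length ≤ 2 * m then 2 * m - h.length + 1 else 0))).foldl
            (fun acc j =>
              if j % 2 = 1 then acc + (-(h.getD (2 * m - j) 0 * h.getD j 0))
              else acc + h.getD (2 * m - j) 0 * h.getD j 0) 0))
        (List.replicate (2 * h.length - 1) 0) := by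
    simp only [compute_self_product_alt, if_neg h0]
  obtain ⟨slen, sget⟩ := foldl_set_even
    (fun m => (List.range' (if h.length ≤ 2 * m then 2 * m - h.length + 1 else 0)
        ((if 2 * m < h.length then 2 * m else h.length - 1) + 1 -
          (if h.length ≤ 2 * m then 2 * m - h.length + 1 else 0))).foldl
      (fun acc j =>
        if j % 2 = 1 then acc + (-(h.getD (2 * m - j) 0 * h.getD j 0))
        else acc + h.getD (2 * m - j) 0 * h.getD j 0) 0)
    (List.replicate (2 * h.length - 1) 0) h.length
    (by intro m hm; rw [List.length_replicate]; omega)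
  rw [halt]
  refine ⟨by rw [slen, List.length_replicate], fun k => ?_⟩
  rw [sget k]
  by_cases hc : k % 2 = 0 ∧ k / 2 < h.length
  · rw [if_pos hc, if_pos hc]
    set m := k / 2 with hm
    have hlo : (if h.length ≤ 2 * m then 2 * m - h.length + 1 else 0) = 2 * m + 1 - h.length := by
      split <;> omega
    have hhi : (if 2 * m < h.length then 2 * m else h.length - 1) = min (2 * m) (h.length - 1) := by
      split <;> omega
    rw [foldl_signed h (2 * m), sum_map_range', zero_add]
    have hbound : (if h.length ≤ 2 * m then 2 * m - h.length + 1 else 0) +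
        ((if 2 * m < h.length then 2 * m else h.length - 1) + 1 -
          (if h.length ≤ 2 * m then 2 * m - h.length + 1 else 0)) =
        (if 2 * m < h.length then 2 * m else h.length - 1) + 1 := by
      rw [hlo, hhi]; omega
    rw [hbound]
  · rw [if_neg hc, if_neg hc, getD_replicate_zero]

theorem lists_eq (h : List Int) (b : Bool) :
    compute_self_product h b = compute_self_product_alt h b := by
  by_cases h0 : h.length = 0
  · have hnil : h = [] := List.eq_nil_of_length_eq_zero h0
    subst hnil
    rfl
  · obtain ⟨alen, aget⟩ := A_char h b
    obtain ⟨blen, bget⟩ := B_char h b h0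
    apply List.ext_getElem (by rw [alen, blen])
    intro k hk1 hk2
    rw [← List.getD_eq_getElem _ 0 hk1, ← List.getD_eq_getElem _ 0 hk2, aget k, bget k]
    rcases Nat.even_or_odd k with he | ho
    · obtain ⟨m, rfl⟩ := he
      have hdiv : (m + m) / 2 = m := by omega
      have hmod : (m + m) % 2 = 0 := by omega
      have hm : m < h.length := by rw [alen] at hk1; omega
      simp only [hdiv, hmod]
      rw [if_pos ⟨trivial, hm⟩]
      have h2m : m + m = 2 * m := by omega
      rw [h2m]
      exact even_sum h m _ _ hm rfl rfl
    · rw [Nat.odd_iff] at ho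
      rw [if_neg (by omega), odd_sum_zero h k ho]

-- ===== VERDICT (by name: the statement is the Claim_ definition above) =====
theorem compute_self_product_spec : Claim_equal_compute_self_product := by
  intro h_coeffs include_h0 _
  unfold Spec_compute_self_product
  exact lists_eq h_coeffs include_h0
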